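-- pv_equiv track=rewrite | github.com/michaelobado/python-learning | RECURSION/recursive_algos.py | has_more_vowels
-- ===== SOURCE A (Python) =====
-- def has_more_vowels(s, vowel_count=0, consonant_count=0):
--     # Base case: if the string is empty, compare vowel and consonant counts
--     if not s:
--         return vowel_count > consonant_count
--
--     # Check if the first character is a vowel or consonant
--     first_char = s[0].lower()
--     if first_char in "aeiou":
--         vowel_count += 1
--     elif first_char.isalpha():
--         consonant_count += 1
--
--     # Recursive call with the rest of the string
--     return has_more_vowels(s[1:], vowel_count, consonant_count)
-- ===== SOURCE B (Python) =====
-- def has_more_vowels(s, vowel_count=0, consonant_count=0):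
--     for ch in s:
--         lc = ch.lower()
--         if lc in "aeiou":
--             vowel_count += 1
--         elif lc.isalpha():
--             consonant_count += 1
--     return vowel_count > consonant_count
-- ===== Notes on version B (the rewrite author's own statement) =====
-- stated objective: faster
-- what changed: Replaced the accumulator-passing recursion (which slices s[1:] each step, quadratic, and raises RecursionError on long input) with a single linear for-loop over the characters.
import Mathlib
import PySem

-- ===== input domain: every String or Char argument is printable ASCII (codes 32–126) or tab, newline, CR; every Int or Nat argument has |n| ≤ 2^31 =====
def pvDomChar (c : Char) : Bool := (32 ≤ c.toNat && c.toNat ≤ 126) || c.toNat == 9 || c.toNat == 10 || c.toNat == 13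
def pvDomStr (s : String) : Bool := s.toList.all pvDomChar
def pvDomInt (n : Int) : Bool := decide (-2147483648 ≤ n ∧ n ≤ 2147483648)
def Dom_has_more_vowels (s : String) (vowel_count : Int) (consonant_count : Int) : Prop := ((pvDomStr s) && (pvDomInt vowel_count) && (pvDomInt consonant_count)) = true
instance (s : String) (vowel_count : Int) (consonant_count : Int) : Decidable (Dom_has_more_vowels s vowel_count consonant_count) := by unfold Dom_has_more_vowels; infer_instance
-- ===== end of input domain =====

-- B replaces A's accumulator-passing recursion over string slices with a single explicit loop over the characters (simpler).


-- ===== PORT A =====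
-- A's recursion, step for step, on the character list (s[0].lower(), membership in "aeiou", isalpha, recurse on s[1:])
def hmvRec : List Char → Int → Int → Bool
  | [], vowel_count, consonant_count => decide (vowel_count > consonant_count)
  | ch :: rest, vowel_count, consonant_count =>
    let first_char := PySem.Chars.lowerChar ch
    if ['a','e','i','o','u'].contains first_char then
      hmvRec rest (vowel_count + 1) consonant_count
    else if PySem.Chars.isalpha first_char then
      hmvRec rest vowel_count (consonant_count + 1)
    else
      hmvRec rest vowel_count consonant_count

def has_more_vowels (s : String) (vowel_count : Int) (consonant_count : Int) : Bool :=
  hmvRec s.toList vowel_count consonant_count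

-- ===== PORT B =====
-- B: one explicit loop (a foldl over the characters) updating the two counters, then compare
def hmvStep (p : Int × Int) (ch : Char) : Int × Int :=
  let lc := PySem.Chars.lowerChar ch
  if ['a','e','i','o','u'].contains lc then (p.1 + 1, p.2)
  else if PySem.Chars.isalpha lc then (p.1, p.2 + 1)
  else p

def has_more_vowels_alt (s : String) (vowel_count : Int) (consonant_count : Int) : Bool :=
  let p := s.toList.foldl hmvStep (vowel_count, consonant_count)
  decide (p.1 > p.2)

-- ===== PRECONDITION & SPEC =====
def Spec_has_more_vowels (s : String) (vowel_count : Int) (consonant_count : Int) (out : Bool) : Prop := out = has_more_vowels_alt s vowel_count consonant_count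
instance (s : String) (vowel_count : Int) (consonant_count : Int) (out : Bool) : Decidable (Spec_has_more_vowels s vowel_count consonant_count out) := by unfold Spec_has_more_vowels; infer_instance

-- ===== CLAIM (what is proved, stated in full; the proofs are below) =====
def Claim_equal_has_more_vowels : Prop := ∀ (s : String) (vowel_count : Int) (consonant_count : Int), Dom_has_more_vowels s vowel_count consonant_count → Spec_has_more_vowels s vowel_count consonant_count (has_more_vowels s vowel_count consonant_count)

-- ===== LEMMAS AND PROOFS =====

-- ===== VERDICT (by name: the statement is the Claim_ definition above) =====
theorem hmvRec_eq_foldl (cs : List Char) : ∀ v c : Int,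
    hmvRec cs v c = decide ((cs.foldl hmvStep (v, c)).1 > (cs.foldl hmvStep (v, c)).2) := by
  induction cs with
  | nil => intro v c; simp [hmvRec]
  | cons ch rest ih =>
    intro v c
    simp only [hmvRec, List.foldl_cons, hmvStep]
    split_ifs <;> simp [ih]

theorem has_more_vowels_spec : Claim_equal_has_more_vowels := by
  intro s v c _
  unfold Spec_has_more_vowels has_more_vowels has_more_vowels_alt
  exact hmvRec_eq_foldl s.toList v c
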